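-- pv_equiv track=rewrite | github.com/123owq/util | extract_v2.py | table_to_records
-- ===== SOURCE A (Python) =====
-- def table_to_records(table: list[list[str]]) -> list[dict]:
--     """표 → 헤더-row dict 리스트 변환 (첫 행이 헤더)"""
--     if not table or len(table) < 2:
--         return []
--     headers = table[0]
--     records = []
--     for row in table[1:]:
--         record = {}
--         for h, v in zip(headers, row):
--             if h:
--                 record[h] = v
--         records.append(record)
--     return records
-- ===== SOURCE B (Python) =====
-- def table_to_records(table: list[list[str]]) -> list[dict]:
--     """표 → 헤더-row dict 리스트 변환 (첫 행이 헤더)"""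
--     if not table or len(table) < 2:
--         return []
--     rows = table[1:]
--     records = [{} for _ in rows]
--     for i, h in enumerate(table[0]):
--         if h:
--             for rec, row in zip(records, rows):
--                 if i < len(row):
--                     rec[h] = row[i]
--     return records
-- ===== Notes on version B (the rewrite author's own statement) =====
-- stated objective: alternative
-- what changed: B fills the records column-major: it allocates one empty dict per data row up front and then, for each non-empty header column, writes that column's value into every record, instead of A's row-major pass that builds each record from a zip of headers and the row.
import Mathlib
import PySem

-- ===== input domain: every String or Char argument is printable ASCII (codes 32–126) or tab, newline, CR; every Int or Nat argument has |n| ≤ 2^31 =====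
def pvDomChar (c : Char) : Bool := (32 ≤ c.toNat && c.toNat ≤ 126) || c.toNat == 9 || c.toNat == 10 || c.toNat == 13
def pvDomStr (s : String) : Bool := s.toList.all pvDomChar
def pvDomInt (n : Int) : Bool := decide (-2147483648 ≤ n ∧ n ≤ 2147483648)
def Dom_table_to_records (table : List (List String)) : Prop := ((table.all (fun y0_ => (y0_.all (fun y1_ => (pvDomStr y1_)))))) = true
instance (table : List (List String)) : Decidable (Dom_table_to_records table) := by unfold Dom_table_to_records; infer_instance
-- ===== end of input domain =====

-- B fills the records column-major (one empty dict per data row up front, then each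
-- non-empty header column written into every record) instead of A's row-major zip pass.

-- ===== PORT A =====
def table_to_records (table : List (List String)) : List (List (String × String)) :=
  if table = [] ∨ table.length < 2 then []
  else
    let headers := table.headI
    let records := (PySem.List.slice table (some 1) none).foldl
      (fun (records : List (List (String × String))) row =>
        records ++ [((headers.zip row).foldl
          (fun (record : PySem.Dict String String) hv =>
            if hv.1 ≠ "" then record.insert hv.1 hv.2 else record)
          PySem.Dict.empty).items])
      []
    records

-- ===== PORT B =====
-- one column step of B's outer loop: write header p.2's column value into every record
def colStep (rows : List (List String)) (recs : List (PySem.Dict String String))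
    (p : Int × String) : List (PySem.Dict String String) :=
  if p.2 ≠ "" then
    (recs.zip rows).map (fun dr =>
      if p.1 < (dr.2.length : Int) then dr.1.insert p.2 (PySem.List.pyGetD dr.2 p.1 "") else dr.1)
  else recs

def table_to_records_alt (table : List (List String)) : List (List (String × String)) :=
  if table = [] ∨ table.length < 2 then []
  else
    let rows := PySem.List.slice table (some 1) none
    let records := rows.map (fun _ => (PySem.Dict.empty : PySem.Dict String String))
    ((PySem.List.enumerate table.headI 0).foldl (colStep rows) records).map PySem.Dict.items

-- ===== PRECONDITION & SPEC =====
def Spec_table_to_records (table : List (List String)) (out : List (List (String × String))) : Prop := out = table_to_records_alt table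
instance (table : List (List String)) (out : List (List (String × String))) : Decidable (Spec_table_to_records table out) := by unfold Spec_table_to_records; infer_instance

-- ===== CLAIM (what is proved, stated in full; the proofs are below) =====
def Claim_equal_table_to_records : Prop := ∀ (table : List (List String)), Dom_table_to_records table → Spec_table_to_records table (table_to_records table)

-- ===== LEMMAS AND PROOFS =====

-- A's per-row fold (zip with in-loop header filter), parameterised by the accumulator.
def foldA (row : List String) (d : PySem.Dict String String) (hs : List String) : PySem.Dict String String :=
  (hs.zip row).foldl
    (fun record hv => if hv.1 ≠ "" then record.insert hv.1 hv.2 else record) d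

-- per-row fold over pre-filtered enumerated headers (indexed form of foldA)
def foldB (row : List String) (d : PySem.Dict String String) (ps : List (Int × String)) : PySem.Dict String String :=
  ps.foldl
    (fun record p => if p.1 < (row.length : Int) then record.insert p.2 (PySem.List.pyGetD row p.1 "") else record) d

-- per-row fold over unfiltered enumerated headers with the filter inline (B's effect on one record)
def foldC (row : List String) (d : PySem.Dict String String) (ps : List (Int × String)) : PySem.Dict String String :=
  ps.foldl
    (fun record p => if p.2 ≠ "" then
        (if p.1 < (row.length : Int) then record.insert p.2 (PySem.List.pyGetD row p.1 "") else record)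
      else record) d

lemma foldA_zip_nil (d : PySem.Dict String String) (hs : List String) :
    foldA [] d hs = d := by simp [foldA]

lemma foldA_cons (v : String) (vs : List String) (d : PySem.Dict String String)
    (h : String) (t : List String) :
    foldA (v :: vs) d (h :: t) = foldA vs (if h ≠ "" then d.insert h v else d) t := rfl

lemma foldB_cons (row : List String) (d : PySem.Dict String String)
    (p : Int × String) (ps : List (Int × String)) :
    foldB row d (p :: ps)
      = foldB row (if p.1 < (row.length : Int) then d.insert p.2 (PySem.List.pyGetD row p.1 "") else d) ps := rfl

lemma foldB_out_of_range (row : List String) (hs : List String) :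
    ∀ (s : Int) (d : PySem.Dict String String), (row.length : Int) ≤ s →
    foldB row d ((PySem.List.enumerate hs s).filter (fun p => p.2 ≠ "")) = d := by
  induction hs with
  | nil => intro s d _; simp [PySem.List.enumerate_nil, foldB]
  | cons h t ih =>
    intro s d hle
    rw [PySem.List.enumerate_cons, List.filter_cons]
    by_cases hh : h = ""
    · simp only [hh, ne_eq, not_true_eq_false, decide_false, if_neg Bool.false_ne_true]
      exact ih (s + 1) d (by omega)
    · simp only [ne_eq, hh, not_false_eq_true, decide_true, if_true]
      rw [foldB_cons]
      rw [if_neg (by omega : ¬ ((s : Int) < (row.length : Int)))]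
      exact ih (s + 1) d (by omega)

lemma row_fold_eq (row : List String) (hs : List String) :
    ∀ (k : Nat) (d : PySem.Dict String String),
    foldA (row.drop k) d hs
      = foldB row d ((PySem.List.enumerate hs (k : Int)).filter (fun p => p.2 ≠ "")) := by
  induction hs with
  | nil => intro k d; simp [PySem.List.enumerate_nil, foldA, foldB]
  | cons h t ih =>
    intro k d
    rw [PySem.List.enumerate_cons, List.filter_cons]
    by_cases hk : k < row.length
    · have hdrop : row.drop k = row[k] :: row.drop (k + 1) := List.drop_eq_getElem_cons hk
      have hget : PySem.List.pyGetD row (k : Int) "" = row[k] := by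
        simp [PySem.List.pyGetD, PySem.List.pyGet?_natCast, List.getElem?_eq_getElem hk]
      have hstep := ih (k + 1)
      by_cases hh : h = ""
      · simp only [hh, ne_eq, not_true_eq_false, decide_false, if_neg Bool.false_ne_true]
        rw [hdrop, foldA_cons, if_neg (by simp : ¬ ("" : String) ≠ "")]
        have := hstep d
        rw [show ((k : Int) + 1) = ((k + 1 : Nat) : Int) by push_cast; ring]
        exact this
      · simp only [ne_eq, hh, not_false_eq_true, decide_true, if_true]
        rw [hdrop, foldA_cons, if_pos hh, foldB_cons,
          if_pos (by exact_mod_cast hk : (k : Int) < (row.length : Int)), hget]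
        have := hstep (d.insert h row[k])
        rw [show ((k : Int) + 1) = ((k + 1 : Nat) : Int) by push_cast; ring]
        exact this
    · have hdrop : row.drop k = [] := List.drop_eq_nil_of_le (by omega)
      have hle : (row.length : Int) ≤ (k : Int) := by exact_mod_cast Nat.le_of_not_lt hk
      by_cases hh : h = ""
      · simp only [hh, ne_eq, not_true_eq_false, decide_false, if_neg Bool.false_ne_true]
        rw [hdrop, foldA_zip_nil]
        exact (foldB_out_of_range row t ((k : Int) + 1) d (by omega)).symm
      · simp only [ne_eq, hh, not_false_eq_true, decide_true, if_true]
        rw [hdrop, foldA_zip_nil, foldB_cons,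
          if_neg (by omega : ¬ ((k : Int) < (row.length : Int)))]
        exact (foldB_out_of_range row t ((k : Int) + 1) d (by omega)).symm

lemma foldC_eq_foldB (row : List String) :
    ∀ (ps : List (Int × String)) (d : PySem.Dict String String),
    foldC row d ps = foldB row d (ps.filter (fun p => p.2 ≠ "")) := by
  intro ps
  induction ps with
  | nil => intro d; simp [foldC, foldB]
  | cons p t ih =>
    intro d
    rw [List.filter_cons]
    by_cases hh : p.2 = ""
    · simp only [hh, ne_eq, not_true_eq_false, decide_false, if_neg Bool.false_ne_true]
      show foldC row (if p.2 ≠ "" then _ else d) t = _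
      rw [if_neg (by simp [hh])]
      exact ih d
    · simp only [ne_eq, hh, not_false_eq_true, decide_true, if_true]
      rw [foldB_cons]
      show foldC row (if p.2 ≠ "" then _ else d) t = _
      rw [if_pos hh]
      exact ih _

lemma zip_map_zip {α β γ : Type} (f : α × β → γ) :
    ∀ (xs : List α) (ys : List β), xs.length = ys.length →
    ((xs.zip ys).map f).zip ys = (xs.zip ys).map (fun p => (f p, p.2)) := by
  intro xs
  induction xs with
  | nil => intro ys _; simp
  | cons x xs ih =>
    intro ys hlen
    cases ys with
    | nil => simp at hlen
    | cons y ys => simp only [List.zip_cons_cons, List.map_cons]; rw [ih ys (by simpa using hlen)]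

lemma colfold_eq (rows : List (List String)) :
    ∀ (ps : List (Int × String)) (recs : List (PySem.Dict String String)),
    recs.length = rows.length →
    ps.foldl (colStep rows) recs = (recs.zip rows).map (fun dr => foldC dr.2 dr.1 ps) := by
  intro ps
  induction ps with
  | nil =>
    intro recs hlen
    simp only [List.foldl_nil]
    rw [show (fun (dr : PySem.Dict String String × List String) => foldC dr.2 dr.1 []) = Prod.fst from rfl]
    exact (List.map_fst_zip (le_of_eq hlen)).symm
  | cons p t ih =>
    intro recs hlen
    rw [List.foldl_cons]
    by_cases hh : p.2 = ""
    · rw [show colStep rows recs p = recs by simp [colStep, hh]]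
      rw [ih recs hlen]
      apply List.map_congr_left
      intro dr _
      show foldC dr.2 dr.1 t = foldC dr.2 (if p.2 ≠ "" then _ else dr.1) t
      rw [if_neg (by simp [hh])]
    · have hstep : colStep rows recs p = (recs.zip rows).map (fun dr =>
          if p.1 < (dr.2.length : Int) then dr.1.insert p.2 (PySem.List.pyGetD dr.2 p.1 "") else dr.1) := by
        simp [colStep, hh]
      rw [hstep, ih _ (by simp [hlen]),
        zip_map_zip _ recs rows hlen, List.map_map]
      apply List.map_congr_left
      intro dr _
      show foldC dr.2 _ t = foldC dr.2 dr.1 (p :: t)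
      show _ = foldC dr.2 (if p.2 ≠ "" then _ else dr.1) t
      rw [if_pos hh]

lemma map_const_zip {α β : Type} (c : β) :
    ∀ (xs : List α), ((xs.map (fun _ => c)).zip xs) = xs.map (fun x => (c, x)) := by
  intro xs; induction xs with
  | nil => rfl
  | cons x t ih => simp only [List.map_cons, List.zip_cons_cons, ih]

lemma foldl_append_eq_map {α β : Type} (f : α → β) (rows : List α) :
    ∀ (acc : List β), rows.foldl (fun recs row => recs ++ [f row]) acc = acc ++ rows.map f := by
  induction rows with
  | nil => intro acc; simp
  | cons r t ih => intro acc; simp [ih]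

-- ===== VERDICT (by name: the statement is the Claim_ definition above) =====
theorem table_to_records_spec : Claim_equal_table_to_records := by
  intro table _
  show table_to_records table = table_to_records_alt table
  unfold table_to_records table_to_records_alt
  by_cases hsmall : table = [] ∨ table.length < 2
  · rw [if_pos hsmall, if_pos hsmall]
  · rw [if_neg hsmall, if_neg hsmall]
    simp only [foldl_append_eq_map, List.nil_append]
    rw [colfold_eq _ _ _ (by simp), map_const_zip, List.map_map, List.map_map]
    apply List.map_congr_left
    intro row _
    show PySem.Dict.items _ = PySem.Dict.items (foldC row PySem.Dict.empty _)
    rw [foldC_eq_foldB]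
    have := row_fold_eq row table.headI 0 PySem.Dict.empty
    simp only [List.drop_zero, Int.natCast_zero] at this
    exact congrArg PySem.Dict.items this
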